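-- pv_equiv track=rewrite | github.com/liren2515/ISP | utils/draping.py | search_border_y
-- ===== SOURCE A (Python) =====
-- def search_border_y(mask, x):
--     mask_y = mask[x]
--     y_l = 0
--     y_r = 0
--     flip = 0
--     for i in range(1,len(mask_y)):
--         if mask_y[i] != mask_y[i-1]:
--             flip += 1
--             if flip == 2:
--                 y_l = i-1
--             elif flip == 3:
--                 y_r = i
--     if flip != 4:
--         raise ValueError('Somthing Wrong!!!!')
--     return y_l, y_r
-- ===== SOURCE B (Python) =====
-- def search_border_y(mask, x):
--     row = mask[x]
--     # Run-length encode the row into [value, length] segments.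
--     runs = []
--     for v in row:
--         if runs and runs[-1][0] == v:
--             runs[-1][1] += 1
--         else:
--             runs.append([v, 1])
--     if len(runs) != 5:
--         raise ValueError('Somthing Wrong!!!!')
--     y_l = runs[0][1] + runs[1][1] - 1
--     y_r = y_l + 1 + runs[2][1]
--     return y_l, y_r
-- ===== Notes on version B (the rewrite author's own statement) =====
-- stated objective: alternative
-- what changed: B run-length encodes the row into (value, length) segments and computes the borders arithmetically from the first three run lengths (y_l = len0+len1-1, y_r = y_l+1+len2), instead of scanning for adjacent-element transitions and counting flips; validation becomes 'exactly 5 runs' instead of 'exactly 4 flips'.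
import Mathlib
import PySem

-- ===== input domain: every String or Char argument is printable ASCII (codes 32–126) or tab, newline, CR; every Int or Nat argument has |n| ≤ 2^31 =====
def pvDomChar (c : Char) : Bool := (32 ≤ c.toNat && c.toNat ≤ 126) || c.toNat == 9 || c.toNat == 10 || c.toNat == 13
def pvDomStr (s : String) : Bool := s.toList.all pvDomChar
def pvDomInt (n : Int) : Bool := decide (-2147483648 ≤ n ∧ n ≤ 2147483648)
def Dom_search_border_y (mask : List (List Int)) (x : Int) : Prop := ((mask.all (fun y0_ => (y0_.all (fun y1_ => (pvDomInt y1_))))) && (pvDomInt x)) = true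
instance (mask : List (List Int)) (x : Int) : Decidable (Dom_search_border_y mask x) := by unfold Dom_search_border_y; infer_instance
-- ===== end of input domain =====

-- B run-length encodes the row into (value, length) runs and derives both borders
-- arithmetically from the first three run lengths (alternative algorithm, same O(n) cost).

-- 'mask_y[i] != mask_y[i-1]' with both lookups as Python pyGet?
def pvTrans (row : List Int) (i : Int) : Bool :=
  decide (PySem.List.pyGet? row i ≠ PySem.List.pyGet? row (i - 1))

-- ===== PORT A =====
-- A's loop body: state (y_l, y_r, flip)
def pvStepA (row : List Int) (s : Int × Int × Int) (i : Int) : Int × Int × Int :=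
  if pvTrans row i then
    (if s.2.2 + 1 = 2 then i - 1 else s.1,
     if s.2.2 + 1 = 3 then i else s.2.1,
     s.2.2 + 1)
  else s

def search_border_y (mask : List (List Int)) (x : Int) : Int × Int :=
  match PySem.List.pyGet? mask x with
  | none => (0, 0)  -- IndexError on mask[x]; excluded by Pre_
  | some mask_y =>
    let st := (PySem.List.pyRange 1 (mask_y.length : Int) 1).foldl (pvStepA mask_y) (0, 0, 0)
    if st.2.2 ≠ 4 then (0, 0)  -- ValueError; excluded by Pre_
    else (st.1, st.2.1)

-- ===== PORT B =====
-- B's loop body; the run list is grown by append in Python, the port carries it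
-- reversed (current run first) and reverses once after the fold.
def pvStepB (acc : List (Int × Int)) (v : Int) : List (Int × Int) :=
  match acc with
  | (w, c) :: rest => if w = v then (w, c + 1) :: rest else (v, 1) :: (w, c) :: rest
  | [] => [(v, 1)]

def search_border_y_alt (mask : List (List Int)) (x : Int) : Int × Int :=
  match PySem.List.pyGet? mask x with
  | none => (0, 0)  -- IndexError on mask[x]; excluded by Pre_
  | some row =>
    let runs := (row.foldl pvStepB []).reverse
    if runs.length ≠ 5 then (0, 0)  -- ValueError; excluded by Pre_
    else
      let y_l := (runs.getD 0 (0, 0)).2 + (runs.getD 1 (0, 0)).2 - 1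
      (y_l, y_l + 1 + (runs.getD 2 (0, 0)).2)

-- ===== PRECONDITION & SPEC =====
-- A raises IndexError when x is out of range for mask, and ValueError unless the selected row has
-- exactly 4 adjacent transitions; Pre_ admits exactly the inputs where A returns.
def Pre_search_border_y (mask : List (List Int)) (x : Int) : Prop :=
  (PySem.List.pyGet? mask x).map
    (fun row => ((PySem.List.pyRange 1 (row.length : Int) 1).filter (pvTrans row)).length) = some 4
instance (mask : List (List Int)) (x : Int) : Decidable (Pre_search_border_y mask x) := by
  unfold Pre_search_border_y; infer_instance

def pvWitness_search_border_y : List (List Int) × Int := ([[0, 1, 0, 1, 0]], 0)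

def Spec_search_border_y (mask : List (List Int)) (x : Int) (out : Int × Int) : Prop := out = search_border_y_alt mask x
instance (mask : List (List Int)) (x : Int) (out : Int × Int) : Decidable (Spec_search_border_y mask x out) := by unfold Spec_search_border_y; infer_instance

-- ===== CLAIM (what is proved, stated in full; the proofs are below) =====
def Claim_equal_search_border_y : Prop := ∀ (mask : List (List Int)) (x : Int), Dom_search_border_y mask x → Pre_search_border_y mask x → Spec_search_border_y mask x (search_border_y mask x)

-- ===== LEMMAS AND PROOFS =====

-- 0-based positions of the adjacent transitions of the row a :: t, structurally
def pvFlA (a : Int) : List Int → List Nat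
  | [] => []
  | b :: t => (if b ≠ a then [0] else []) ++ (pvFlA b t).map (· + 1)

-- structural run-length encoding of a :: t, the head run already holding count c
def pvRleSc (w c : Int) : List Int → List (Int × Int)
  | [] => [(w, c)]
  | b :: s => if b = w then pvRleSc w (c + 1) s else (w, c) :: pvRleSc b 1 s

-- cumulative sums of run lengths, starting from c
def pvCum (c : Int) : List Int → List Int
  | [] => []
  | l :: r => (c + l) :: pvCum (c + l) r

theorem pvFlA_spec (t : List Int) : ∀ (a : Int),
    (List.range t.length).filter (fun k => decide (t[k]? ≠ (a :: t)[k]?)) = pvFlA a t := by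
  induction t with
  | nil => intro a; rfl
  | cons b s ih =>
    intro a
    rw [show (b :: s).length = s.length + 1 from rfl, List.range_succ_eq_map,
        List.filter_cons, List.filter_map]
    have hp : (fun k => decide ((b :: s)[k]? ≠ (a :: b :: s)[k]?)) ∘ Nat.succ
        = fun k => decide (s[k]? ≠ (b :: s)[k]?) := by
      funext k; simp
    rw [hp, ih b]
    by_cases hba : b = a
    · rw [if_neg (by simp [hba]), pvFlA, if_neg (by simp [hba])]
      rfl
    · rw [if_pos (by simp [hba]), pvFlA, if_pos (by simp [hba])]
      rfl

-- the filtered transition indices of a :: t are the structural positions shifted by 1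
theorem flips_eq (a : Int) (t : List Int) :
    (PySem.List.pyRange 1 (((a :: t).length : Int)) 1).filter (pvTrans (a :: t))
      = List.map (fun k : Nat => (k : Int) + 1) (pvFlA a t) := by
  rw [PySem.List.pyRange_one]
  have hn : ((((a :: t).length : Int)) - 1).toNat = t.length := by
    simp [List.length_cons]
  rw [hn, List.filter_map]
  have hp : (pvTrans (a :: t)) ∘ (fun k : Nat => (1 : Int) + ↑k)
      = fun k => decide (t[k]? ≠ (a :: t)[k]?) := by
    funext k
    have h1 : (1 : Int) + (k : Int) = ((k + 1 : Nat) : Int) := by push_cast; ring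
    have h2 : ((k + 1 : Nat) : Int) - 1 = ((k : Nat) : Int) := by push_cast; ring
    simp only [Function.comp, pvTrans, h1, h2, PySem.List.pyGet?_natCast,
      List.getElem?_cons_succ]
  rw [hp, pvFlA_spec]
  exact List.map_congr_left (fun k _ => by ring)

theorem pvRleSc_ne_nil (t : List Int) : ∀ (w c : Int), pvRleSc w c t ≠ [] := by
  induction t with
  | nil => intro w c; simp [pvRleSc]
  | cons b s ih => intro w c; by_cases h : b = w <;> simp [pvRleSc, h, ih]

-- B's fold with a nonempty (reversed) accumulator is the structural RLE
theorem foldl_stepB_rle (t : List Int) : ∀ (w c : Int) (rest : List (Int × Int)),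
    t.foldl pvStepB ((w, c) :: rest) = (pvRleSc w c t).reverse ++ rest := by
  induction t with
  | nil => intro w c rest; simp [pvRleSc]
  | cons b s ih =>
    intro w c rest
    by_cases h : w = b
    · rw [List.foldl_cons, show pvStepB ((w,c)::rest) b = (w, c+1) :: rest by simp [pvStepB, h],
        ih, pvRleSc, if_pos h.symm]
    · rw [List.foldl_cons, show pvStepB ((w,c)::rest) b = (b,1) :: (w,c) :: rest by simp [pvStepB, h],
        ih, pvRleSc, if_neg (fun hh => h hh.symm)]
      simp

theorem pvCum_shift (l : List Int) : ∀ (c d : Int),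
    pvCum (c + d) l = (pvCum c l).map (· + d) := by
  induction l with
  | nil => intro c d; rfl
  | cons a r ih =>
    intro c d
    simp only [pvCum, List.map_cons, List.cons.injEq]
    exact ⟨by ring, by rw [show c + d + a = c + a + d by ring, ih]⟩

theorem pvCum_length (l : List Int) : ∀ (c : Int), (pvCum c l).length = l.length := by
  induction l with
  | nil => intro c; rfl
  | cons a r ih => intro c; simp [pvCum, ih]

theorem pvCum_ne_nil (c : Int) (l : List Int) (h : l ≠ []) : pvCum c l ≠ [] := by
  cases l with
  | nil => exact absurd rfl h
  | cons a r => simp [pvCum]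

-- core correspondence: flip positions (shifted by e) = cumulative run lengths minus the last
theorem flA_eq_cum_rle (t : List Int) : ∀ (a e : Int),
    List.map (fun k : Nat => (k : Int) + 1 + e) (pvFlA a t)
      = (pvCum 0 ((pvRleSc a (1 + e) t).map (·.2))).dropLast := by
  induction t with
  | nil => intro a e; simp [pvFlA, pvRleSc, pvCum]
  | cons b s ih =>
    intro a e
    by_cases hba : b = a
    · rw [pvFlA, if_neg (by simp [hba]), List.nil_append, List.map_map, Function.comp_def]
      have hfun : (fun x : Nat => (((x + 1 : Nat) : Int)) + 1 + e)
          = fun k : Nat => (k : Int) + 1 + (e + 1) := by funext k; push_cast; ring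
      rw [hfun, ih b (e + 1), pvRleSc, if_pos hba, hba]
      ring_nf
    · rw [pvFlA, if_pos (by simp [hba]), List.singleton_append, List.map_cons,
        List.map_map, Function.comp_def, pvRleSc, if_neg hba, List.map_cons, pvCum]
      have hne : pvCum (0 + (1 + e)) ((pvRleSc b 1 s).map (·.2)) ≠ [] :=
        pvCum_ne_nil _ _ (by simp [pvRleSc_ne_nil])
      rw [List.dropLast_cons_of_ne_nil hne]
      have hfun : (fun x : Nat => (((x + 1 : Nat) : Int)) + 1 + e)
          = fun k : Nat => ((k : Int) + 1 + 0) + (1 + e) := by funext k; push_cast; ring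
      rw [hfun,
        show (fun k : Nat => ((k : Int) + 1 + 0) + (1 + e))
          = (fun x : Int => x + (1 + e)) ∘ (fun k : Nat => (k : Int) + 1 + 0) from rfl,
        ← List.map_map, ih b 0]
      rw [show (1 : Int) + 0 = 1 from rfl, List.map_dropLast, ← pvCum_shift]
      norm_num

-- A-side: the loop body acts as pvFlipStep on transition indices and is the identity elsewhere
def pvFlipStep (s : Int × Int × Int) (i : Int) : Int × Int × Int :=
  (if s.2.2 + 1 = 2 then i - 1 else s.1,
   if s.2.2 + 1 = 3 then i else s.2.1,
   s.2.2 + 1)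

theorem foldl_stepA_filter (row : List Int) (l : List Int) (s : Int × Int × Int) :
    l.foldl (pvStepA row) s = (l.filter (pvTrans row)).foldl pvFlipStep s := by
  induction l generalizing s with
  | nil => rfl
  | cons a t ih =>
    by_cases h : pvTrans row a = true <;>
      simp [List.foldl, List.filter, h, pvStepA, pvFlipStep, ih]

theorem foldl_flipStep_four (a b c d : Int) :
    [a, b, c, d].foldl pvFlipStep (0, 0, 0) = (b - 1, c, 4) := by
  simp [List.foldl, pvFlipStep]

theorem pvWitness_ok :
    Dom_search_border_y pvWitness_search_border_y.1 pvWitness_search_border_y.2 ∧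
    Pre_search_border_y pvWitness_search_border_y.1 pvWitness_search_border_y.2 := by
  decide

-- ===== VERDICT (by name: the statement is the Claim_ definition above) =====
theorem search_border_y_spec : Claim_equal_search_border_y := by
  intro mask x _ hpre
  unfold Spec_search_border_y search_border_y search_border_y_alt
  cases h : PySem.List.pyGet? mask x with
  | none => simp [Pre_search_border_y, h] at hpre
  | some row =>
    simp only [Pre_search_border_y, h, Option.map_some, Option.some.injEq] at hpre
    cases row with
    | nil => rw [show ((List.nil (α := Int)).length : Int) = 0 from rfl,
        PySem.List.pyRange_one_eq_nil (by norm_num)] at hpre; simp at hpre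
    | cons a t =>
      rw [flips_eq, List.length_map] at hpre
      obtain ⟨k0, k1, k2, k3, hfl⟩ := List.length_eq_four.mp hpre
      -- B's runs are the structural RLE
      have hruns : ((a :: t).foldl pvStepB []).reverse = pvRleSc a 1 t := by
        rw [List.foldl_cons, show pvStepB [] a = [(a, 1)] from rfl, foldl_stepB_rle]
        simp
      have hC := flA_eq_cum_rle t a 0
      rw [show (1 : Int) + 0 = 1 from rfl, hfl] at hC
      -- length of the RLE is 5
      have hlen5 : (pvRleSc a 1 t).length = 5 := by
        have h1 : ((pvCum 0 ((pvRleSc a 1 t).map (·.2))).dropLast).length = 4 := by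
          rw [← hC]; rfl
        have h2 := pvCum_length ((pvRleSc a 1 t).map (·.2)) 0
        have h3 : pvCum 0 ((pvRleSc a 1 t).map (·.2)) ≠ [] :=
          pvCum_ne_nil _ _ (by simp [pvRleSc_ne_nil])
        have h4 := @List.length_dropLast _ (pvCum 0 ((pvRleSc a 1 t).map (·.2)))
        have h5 : (pvCum 0 ((pvRleSc a 1 t).map (·.2))).length ≠ 0 := by
          simpa [List.length_eq_zero_iff] using h3
        simp only [List.length_map] at h2
        omega
      rcases hR : pvRleSc a 1 t with _ | ⟨r0, _ | ⟨r1, _ | ⟨r2, _ | ⟨r3, _ | ⟨r4, rest⟩⟩⟩⟩⟩ <;>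
        rw [hR] at hlen5 <;> simp at hlen5
      subst hlen5
      rw [hR] at hC hruns
      simp only [List.map_cons, List.map_nil, pvCum, List.dropLast,
        List.cons.injEq] at hC
      -- A's fold over the transition indices
      dsimp only
      rw [foldl_stepA_filter, flips_eq, hfl, hruns]
      simp only [List.map_cons, List.map_nil]
      rw [foldl_flipStep_four]
      obtain ⟨e0, e1, e2, e3, -⟩ := hC
      simp only [ne_eq, List.length_cons, List.length_nil, List.getD]
      norm_num
      constructor
      · omega
      · omega
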